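-- pv_equiv track=rewrite | github.com/ericd13/Cours | ITC/Sup/TP/Codes/polynomespy.py | produitMonome
-- ===== SOURCE A (Python) =====
-- def degre(P):
--     """Entrée : une liste qui représente un polynome
--        Sortie : le degré du polynôme, -1 pour le polynome nul"""
--     deg = -1
--     for k in range(len(P)):
--         if P[k] != 0:
--             deg = k
--     return deg
--
-- def reduire(P):
--     """Entrée : une liste qui représente un polynome
--        Sortie : une liste qui représente le même polynôme
--                 et dont le dernier terme est non nul"""
--     d = degre(P)
--     return P[0:d+1] # On doit garder P[d]
--
-- def produitMonome(P, a, k):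
--     """Entrée : une liste P, un réel a et un entier positif k
--        Sortie : une liste qui représente le produit par aX**k
--                 du polynôme représenté par la liste P"""
--     n = len(P)
--     res = []
--     for i in range(k):
--         res.append(0)
--     for i in range(n):
--         res.append(a*P[i])
--     return reduire(res)
-- ===== SOURCE B (Python) =====
-- def produitMonome(P, a, k):
--     """Construct the result directly: find the last nonzero coefficient of P
--     from the right, then build [0]*k followed by the scaled prefix, so no
--     padded intermediate list and no trailing-zero trim pass are needed."""
--     if a != 0:
--         for d in range(len(P) - 1, -1, -1):
--             if P[d] != 0:
--                 return [0] * max(k, 0) + [a * x for x in P[:d + 1]]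
--     return []
-- ===== Notes on version B (the rewrite author's own statement) =====
-- stated objective: alternative
-- what changed: Instead of building the full padded product list and then trimming it with a degre scan and a slice, B scans P once from the right for the last nonzero coefficient and directly emits [0]*k plus the scaled prefix, so no intermediate result list and no trim pass exist.
import Mathlib
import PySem

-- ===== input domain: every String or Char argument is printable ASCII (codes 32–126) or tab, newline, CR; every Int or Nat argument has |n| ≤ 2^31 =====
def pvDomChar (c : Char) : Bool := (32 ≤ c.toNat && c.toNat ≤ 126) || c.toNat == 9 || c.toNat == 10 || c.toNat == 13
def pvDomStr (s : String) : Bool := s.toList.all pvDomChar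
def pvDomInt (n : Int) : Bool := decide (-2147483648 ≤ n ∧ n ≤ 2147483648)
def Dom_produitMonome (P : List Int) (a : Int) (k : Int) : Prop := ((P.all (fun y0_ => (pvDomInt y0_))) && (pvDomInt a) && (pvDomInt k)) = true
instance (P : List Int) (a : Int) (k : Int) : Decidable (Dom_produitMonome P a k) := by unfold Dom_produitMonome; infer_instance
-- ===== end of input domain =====

-- B builds the answer directly (scan from the right for the last nonzero
-- coefficient, then emit the padding and the scaled prefix once) instead of
-- A's build-full-padded-list-then-trim; alternative decomposition, same cost.

-- ===== PORT A =====
def degre (P : List Int) : Int :=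
  (PySem.List.pyRange 0 (P.length : Int) 1).foldl
    (fun deg kk => if PySem.List.pyGetD P kk 0 ≠ 0 then kk else deg) (-1)

def reduire (P : List Int) : List Int :=
  PySem.List.slice P (some 0) (some (degre P + 1))

def produitMonome (P : List Int) (a : Int) (k : Int) : List Int :=
  let n : Int := (P.length : Int)
  let res1 := (PySem.List.pyRange 0 k 1).foldl (fun res _ => res ++ [(0 : Int)]) []
  let res2 := (PySem.List.pyRange 0 n 1).foldl
    (fun res i => res ++ [a * PySem.List.pyGetD P i 0]) res1
  reduire res2

-- ===== PORT B =====
-- the 'for d in range(len(P)-1, -1, -1): … return …' loop with early return,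
-- as structural recursion over the (descending) index list
def altLoop (P : List Int) (a : Int) (k : Int) : List Int → List Int
  | [] => []
  | d :: rest =>
      if PySem.List.pyGetD P d 0 ≠ 0 then
        List.replicate (max k 0).toNat 0 ++
          (PySem.List.slice P (some 0) (some (d + 1))).map (fun x => a * x)
      else altLoop P a k rest

def produitMonome_alt (P : List Int) (a : Int) (k : Int) : List Int :=
  if a ≠ 0 then
    altLoop P a k (PySem.List.pyRange ((P.length : Int) - 1) (-1) (-1))
  else []

-- ===== PRECONDITION & SPEC =====
def Spec_produitMonome (P : List Int) (a : Int) (k : Int) (out : List Int) : Prop := out = produitMonome_alt P a k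
instance (P : List Int) (a : Int) (k : Int) (out : List Int) : Decidable (Spec_produitMonome P a k out) := by unfold Spec_produitMonome; infer_instance

-- ===== CLAIM (what is proved, stated in full; the proofs are below) =====
def Claim_equal_produitMonome : Prop := ∀ (P : List Int) (a : Int) (k : Int), Dom_produitMonome P a k → Spec_produitMonome P a k (produitMonome P a k)

-- ===== LEMMAS AND PROOFS =====

-- the prefix of A's degre-fold over Q ++ [x] computes degre Q
theorem degre_prefix_fold (Q : List Int) (x : Int) :
    List.foldl (fun deg kk => if PySem.List.pyGetD (Q ++ [x]) kk 0 ≠ 0 then kk else deg) (-1)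
      (PySem.List.pyRange 0 (Q.length : Int)) = degre Q := by
  unfold degre
  apply PySem.List.foldl_congr_mem
  intro acc i hi
  have ⟨h0, h1⟩ := PySem.List.mem_pyRange_one.mp hi
  rw [PySem.List.pyGetD_eq_getElem _ _ h0 (by simp; omega),
      PySem.List.pyGetD_eq_getElem _ _ h0 (by exact_mod_cast h1)]
  rw [List.getElem_append_left (by omega)]

theorem pyGetD_append_last (Q : List Int) (x : Int) :
    PySem.List.pyGetD (Q ++ [x]) (Q.length : Int) 0 = x := by
  rw [PySem.List.pyGetD_eq_getElem _ _ (by positivity) (by simp)]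
  simp

theorem degre_append_singleton (Q : List Int) (x : Int) :
    degre (Q ++ [x]) = if x ≠ 0 then (Q.length : Int) else degre Q := by
  conv_lhs => unfold degre
  have hlen : (((Q ++ [x]).length : Int)) = (Q.length : Int) + 1 := by simp
  rw [hlen, PySem.List.pyRange_one_succ_right (by positivity), List.foldl_append]
  simp only [List.foldl_cons, List.foldl_nil]
  rw [degre_prefix_fold, pyGetD_append_last]

theorem degre_bounds (P : List Int) : -1 ≤ degre P ∧ degre P < (P.length : Int) := by
  induction P using List.reverseRecOn with
  | nil => decide
  | append_singleton Q x ih =>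
    rw [degre_append_singleton]
    rcases ih with ⟨l, r⟩
    have hlen : (((Q ++ [x]).length : Int)) = (Q.length : Int) + 1 := by simp
    rw [hlen]
    split
    · constructor <;> omega
    · constructor <;> omega

theorem reduire_eq_take (L : List Int) :
    reduire L = L.take (degre L + 1).toNat := by
  unfold reduire
  rw [PySem.List.slice_toNat _ le_rfl (by have := (degre_bounds L).1; omega)]
  simp

theorem degre_all_zero (L : List Int) (h : ∀ y ∈ L, y = 0) : degre L = -1 := by
  induction L using List.reverseRecOn with
  | nil => decide
  | append_singleton Q x ih =>
    rw [degre_append_singleton]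
    have hx : x = 0 := h x (by simp)
    simp only [hx, ne_eq, not_true_eq_false, if_false]
    exact ih (fun y hy => h y (by simp [hy]))

theorem reduire_all_zero (L : List Int) (h : ∀ y ∈ L, y = 0) : reduire L = [] := by
  rw [reduire_eq_take, degre_all_zero L h]
  simp

theorem reduire_append_singleton (L : List Int) (x : Int) :
    reduire (L ++ [x]) = if x = 0 then reduire L else L ++ [x] := by
  rw [reduire_eq_take, degre_append_singleton]
  by_cases hx : x = 0
  · simp only [hx, ne_eq, not_true_eq_false, if_false, if_true]
    rw [List.take_append_of_le_length (by have := (degre_bounds L).2; omega)]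
    rw [reduire_eq_take]
  · simp only [hx, ne_eq, not_false_eq_true, if_true, if_false]
    have h1 : ((L.length : Int) + 1).toNat = L.length + 1 := by omega
    rw [h1]
    apply List.take_of_length_le
    simp

theorem produitMonome_closed (P : List Int) (a : Int) (k : Int) :
    produitMonome P a k = reduire (List.replicate k.toNat 0 ++ P.map (fun x => a * x)) := by
  unfold produitMonome
  simp only
  rw [PySem.List.foldl_append_singleton_eq_map (fun _ => (0 : Int))]
  have h1 : List.map (fun _ => (0 : Int)) (PySem.List.pyRange 0 k) =
      List.replicate k.toNat 0 := by
    rw [List.eq_replicate_iff]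
    constructor
    · rw [List.length_map, PySem.List.length_pyRange_one]; omega
    · simp
  rw [h1, List.nil_append,
      PySem.List.foldl_append_singleton_eq_map (fun i => a * PySem.List.pyGetD P i 0)]
  congr 1
  have h2 : List.map (fun i => a * PySem.List.pyGetD P i 0) (PySem.List.pyRange 0 (P.length : Int)) =
      ((PySem.List.pyRange 0 (P.length : Int)).map (fun j => PySem.List.pyGetD P j 0)).map
        (fun x => a * x) := by
    rw [List.map_map]
    rfl
  rw [h2]
  have h3 := PySem.List.map_pyGetD_pyRange_zero P 0
  simp only [PySem.List.len_eq] at h3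
  rw [h3]

theorem altLoop_restrict (Q : List Int) (x : Int) (a k : Int) (idxs : List Int)
    (h : ∀ d ∈ idxs, 0 ≤ d ∧ d < (Q.length : Int)) :
    altLoop (Q ++ [x]) a k idxs = altLoop Q a k idxs := by
  induction idxs with
  | nil => rfl
  | cons d rest ih =>
    have ⟨h0, h1⟩ := h d (by simp)
    unfold altLoop
    have hget : PySem.List.pyGetD (Q ++ [x]) d 0 = PySem.List.pyGetD Q d 0 := by
      rw [PySem.List.pyGetD_eq_getElem _ _ h0 (by simp; omega),
          PySem.List.pyGetD_eq_getElem _ _ h0 (by exact_mod_cast h1)]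
      rw [List.getElem_append_left (by omega)]
    have hslice : PySem.List.slice (Q ++ [x]) (some 0) (some (d + 1)) =
        PySem.List.slice Q (some 0) (some (d + 1)) := by
      rw [PySem.List.slice_toNat _ le_rfl (by omega),
          PySem.List.slice_toNat _ le_rfl (by omega)]
      simp only [Int.toNat_zero, List.drop_zero, Nat.sub_zero]
      rw [List.take_append_of_le_length (by omega)]
    rw [hget, hslice]
    split
    · rfl
    · exact ih (fun d hd => h d (by simp [hd]))

theorem altLoop_main (a k : Int) (ha : a ≠ 0) (P : List Int) :
    altLoop P a k (PySem.List.pyRange ((P.length : Int) - 1) (-1) (-1)) =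
      reduire (List.replicate k.toNat 0 ++ P.map (fun x => a * x)) := by
  induction P using List.reverseRecOn with
  | nil =>
    rw [PySem.List.pyRange_neg_one_eq_nil (by norm_num)]
    simp only [List.map_nil, List.append_nil]
    rw [reduire_all_zero _ (by intro y hy; exact (List.eq_of_mem_replicate hy))]
    rfl
  | append_singleton Q x ih =>
    have hlen : (((Q ++ [x]).length : Int)) - 1 = (Q.length : Int) := by simp
    rw [hlen, PySem.List.pyRange_neg_one_cons (by omega)]
    unfold altLoop
    rw [pyGetD_append_last]
    by_cases hx : x = 0
    · simp only [hx, ne_eq, not_true_eq_false, if_false]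
      rw [altLoop_restrict Q 0 a k _
          (fun d hd => by
            have := PySem.List.mem_pyRange_neg_one.mp hd
            constructor <;> omega)]
      rw [ih]
      conv_rhs =>
        rw [show (Q ++ [(0 : Int)]).map (fun x => a * x) =
              Q.map (fun x => a * x) ++ [0] by simp,
            ← List.append_assoc, reduire_append_singleton]
      simp
    · simp only [hx, ne_eq, not_false_eq_true, if_true]
      have hslice : PySem.List.slice (Q ++ [x]) (some 0) (some ((Q.length : Int) + 1)) =
          Q ++ [x] := by
        rw [PySem.List.slice_toNat _ le_rfl (by positivity)]
        apply List.take_of_length_le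
        simp
      rw [hslice]
      have hk : (max k 0).toNat = k.toNat := by omega
      rw [hk]
      have hax : a * x ≠ 0 := mul_ne_zero ha hx
      conv_rhs =>
        rw [show (Q ++ [x]).map (fun x => a * x) =
              Q.map (fun x => a * x) ++ [a * x] by simp,
            ← List.append_assoc, reduire_append_singleton]
      simp [hax, List.append_assoc]

-- ===== VERDICT (by name: the statement is the Claim_ definition above) =====
theorem produitMonome_spec : Claim_equal_produitMonome := by
  intro P a k _
  unfold Spec_produitMonome produitMonome_alt
  rw [produitMonome_closed]
  by_cases ha : a = 0
  · simp only [ha, ne_eq, not_true_eq_false, if_false]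
    apply reduire_all_zero
    intro y hy
    rcases List.mem_append.mp hy with h | h
    · exact List.eq_of_mem_replicate h
    · rcases List.mem_map.mp h with ⟨z, _, hz⟩
      omega
  · simp only [ha, ne_eq, not_false_eq_true, if_true]
    exact (altLoop_main a k ha P).symm
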